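-- pv_equiv track=rewrite | github.com/ZinMinThaw-23/Explicit-Content-Detection | DataPreprocessing.py | get_lda_words
-- ===== SOURCE A (Python) =====
-- def get_lda_words(review):
--   target_word = ['chorus','girl','money','baby','nigga','bitch','want','love','wanna','gonna','come','right','shit','feel']
--   count = 0
--   threshold = 0
--   for t in target_word:
--         if review.find(t) != -1:
--             count += 1
--   return count > threshold
-- ===== SOURCE B (Python) =====
-- def get_lda_words(review):
--     suffixes_by_first = {
--         'c': ('horus', 'ome'),
--         'g': ('irl', 'onna'),
--         'm': ('oney',),
--         'b': ('aby', 'itch'),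
--         'n': ('igga',),
--         'w': ('ant', 'anna'),
--         'l': ('ove',),
--         'r': ('ight',),
--         's': ('hit',),
--         'f': ('eel',),
--     }
--     for i in range(len(review)):
--         for rest in suffixes_by_first.get(review[i], ()):
--             if review.startswith(rest, i + 1):
--                 return True
--     return False
-- ===== Notes on version B (the rewrite author's own statement) =====
-- stated objective: alternative
-- what changed: Replaces 14 independent str.find scans counted against a threshold by a single left-to-right scan of the review that at each position dispatches on the current character to a first-letter index of target-word suffixes and tests startswith there, returning on the first hit.
import Mathlib
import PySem

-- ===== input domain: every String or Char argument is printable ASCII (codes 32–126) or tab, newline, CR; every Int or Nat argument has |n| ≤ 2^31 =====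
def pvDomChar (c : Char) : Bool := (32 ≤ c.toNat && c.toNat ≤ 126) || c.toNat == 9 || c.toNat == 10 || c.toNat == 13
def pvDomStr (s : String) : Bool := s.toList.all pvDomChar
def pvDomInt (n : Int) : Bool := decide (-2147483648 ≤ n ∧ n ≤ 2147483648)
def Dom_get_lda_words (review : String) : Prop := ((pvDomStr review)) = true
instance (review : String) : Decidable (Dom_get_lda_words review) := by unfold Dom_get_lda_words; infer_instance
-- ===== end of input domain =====

-- B replaces A's 14 independent str.find scans with a single positional scan of the review dispatching on the current character through a first-letter index of suffixes (alternative algorithm, same cost class).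


-- ===== PORT A =====
def pvTargetWords : List String :=
  ["chorus","girl","money","baby","nigga","bitch","want","love","wanna","gonna","come","right","shit","feel"]

-- for t in target_word: if review.find(t) != -1: count += 1;  return count > threshold (= 0)
def get_lda_words (review : String) : Bool :=
  let count : Int :=
    pvTargetWords.foldl (fun count t => if PySem.Str.find review t ≠ -1 then count + 1 else count) 0
  count > 0

-- ===== PORT B =====
-- suffixes_by_first.get(review[i], ())
def pvByFirst (c : Char) : List String :=
  if c = 'c' then ["horus","ome"]
  else if c = 'g' then ["irl","onna"]
  else if c = 'm' then ["oney"]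
  else if c = 'b' then ["aby","itch"]
  else if c = 'n' then ["igga"]
  else if c = 'w' then ["ant","anna"]
  else if c = 'l' then ["ove"]
  else if c = 'r' then ["ight"]
  else if c = 's' then ["hit"]
  else if c = 'f' then ["eel"]
  else []

-- scan over positions i (here: over the suffix at i); review.startswith(rest, i+1) = rest prefix of the tail
def pvScan : List Char → Bool
  | [] => false
  | c :: rest => (pvByFirst c).any (fun w => w.toList.isPrefixOf rest) || pvScan rest

def get_lda_words_alt (review : String) : Bool :=
  pvScan review.toList

-- ===== PRECONDITION & SPEC =====
def Spec_get_lda_words (review : String) (out : Bool) : Prop := out = get_lda_words_alt review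
instance (review : String) (out : Bool) : Decidable (Spec_get_lda_words review out) := by unfold Spec_get_lda_words; infer_instance

-- ===== CLAIM (what is proved, stated in full; the proofs are below) =====
def Claim_equal_get_lda_words : Prop := ∀ (review : String), Dom_get_lda_words review → Spec_get_lda_words review (get_lda_words review)

-- ===== LEMMAS AND PROOFS =====

-- A's fold counts the words it finds; the count is positive iff ANY word is an infix.
theorem pv_foldl_count_pos (review : String) (ws : List String) (c : Int) (hc : 0 ≤ c) :
    decide ((ws.foldl (fun count t => if PySem.Str.find review t ≠ -1 then count + 1 else count) c) > 0)
      = (decide (c > 0) || ws.any (fun t => decide (t.toList <:+: review.toList))) := by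
  induction ws generalizing c with
  | nil => simp
  | cons t ws ih =>
    simp only [List.foldl_cons, List.any_cons]
    by_cases h : PySem.Str.find review t = -1
    · have hni : ¬ t.toList <:+: review.toList := (PySem.Str.find_eq_neg_one_iff review t).mp h
      simp only [if_neg (not_not_intro h), ih c hc, hni, decide_false, Bool.false_or]
    · have hi : t.toList <:+: review.toList :=
        by_contra fun hn => h ((PySem.Str.find_eq_neg_one_iff review t).mpr hn)
      simp only [if_pos h, ih (c + 1) (by omega), hi, decide_true, Bool.true_or, Bool.or_true,
        show c + 1 > 0 from by omega]

-- B's per-position dispatch is exactly "some target word starts here".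
set_option maxHeartbeats 2000000 in
theorem pv_byFirst_step (c : Char) (rest : List Char) :
    ((pvByFirst c).any (fun w => w.toList.isPrefixOf rest))
      = pvTargetWords.any (fun t => t.toList.isPrefixOf (c :: rest)) := by
  unfold pvByFirst
  split_ifs with h1 h2 h3 h4 h5 h6 h7 h8 h9 h10
  · subst h1; simp [pvTargetWords,
      show "chorus".toList = ['c','h','o','r','u','s'] from rfl,
      show "girl".toList = ['g','i','r','l'] from rfl,
      show "money".toList = ['m','o','n','e','y'] from rfl,
      show "baby".toList = ['b','a','b','y'] from rfl,
      show "nigga".toList = ['n','i','g','g','a'] from rfl,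
      show "bitch".toList = ['b','i','t','c','h'] from rfl,
      show "want".toList = ['w','a','n','t'] from rfl,
      show "love".toList = ['l','o','v','e'] from rfl,
      show "wanna".toList = ['w','a','n','n','a'] from rfl,
      show "gonna".toList = ['g','o','n','n','a'] from rfl,
      show "come".toList = ['c','o','m','e'] from rfl,
      show "right".toList = ['r','i','g','h','t'] from rfl,
      show "shit".toList = ['s','h','i','t'] from rfl,
      show "feel".toList = ['f','e','e','l'] from rfl,
      show "horus".toList = ['h','o','r','u','s'] from rfl,
      show "ome".toList = ['o','m','e'] from rfl,
      show "irl".toList = ['i','r','l'] from rfl,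
      show "onna".toList = ['o','n','n','a'] from rfl,
      show "oney".toList = ['o','n','e','y'] from rfl,
      show "aby".toList = ['a','b','y'] from rfl,
      show "itch".toList = ['i','t','c','h'] from rfl,
      show "igga".toList = ['i','g','g','a'] from rfl,
      show "ant".toList = ['a','n','t'] from rfl,
      show "anna".toList = ['a','n','n','a'] from rfl,
      show "ove".toList = ['o','v','e'] from rfl,
      show "ight".toList = ['i','g','h','t'] from rfl,
      show "hit".toList = ['h','i','t'] from rfl,
      show "eel".toList = ['e','e','l'] from rfl,
      List.isPrefixOf]
  · subst h2; simp [pvTargetWords,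
      show "chorus".toList = ['c','h','o','r','u','s'] from rfl,
      show "girl".toList = ['g','i','r','l'] from rfl,
      show "money".toList = ['m','o','n','e','y'] from rfl,
      show "baby".toList = ['b','a','b','y'] from rfl,
      show "nigga".toList = ['n','i','g','g','a'] from rfl,
      show "bitch".toList = ['b','i','t','c','h'] from rfl,
      show "want".toList = ['w','a','n','t'] from rfl,
      show "love".toList = ['l','o','v','e'] from rfl,
      show "wanna".toList = ['w','a','n','n','a'] from rfl,
      show "gonna".toList = ['g','o','n','n','a'] from rfl,
      show "come".toList = ['c','o','m','e'] from rfl,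
      show "right".toList = ['r','i','g','h','t'] from rfl,
      show "shit".toList = ['s','h','i','t'] from rfl,
      show "feel".toList = ['f','e','e','l'] from rfl,
      show "horus".toList = ['h','o','r','u','s'] from rfl,
      show "ome".toList = ['o','m','e'] from rfl,
      show "irl".toList = ['i','r','l'] from rfl,
      show "onna".toList = ['o','n','n','a'] from rfl,
      show "oney".toList = ['o','n','e','y'] from rfl,
      show "aby".toList = ['a','b','y'] from rfl,
      show "itch".toList = ['i','t','c','h'] from rfl,
      show "igga".toList = ['i','g','g','a'] from rfl,
      show "ant".toList = ['a','n','t'] from rfl,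
      show "anna".toList = ['a','n','n','a'] from rfl,
      show "ove".toList = ['o','v','e'] from rfl,
      show "ight".toList = ['i','g','h','t'] from rfl,
      show "hit".toList = ['h','i','t'] from rfl,
      show "eel".toList = ['e','e','l'] from rfl,
      List.isPrefixOf]
  · subst h3; simp [pvTargetWords,
      show "chorus".toList = ['c','h','o','r','u','s'] from rfl,
      show "girl".toList = ['g','i','r','l'] from rfl,
      show "money".toList = ['m','o','n','e','y'] from rfl,
      show "baby".toList = ['b','a','b','y'] from rfl,
      show "nigga".toList = ['n','i','g','g','a'] from rfl,
      show "bitch".toList = ['b','i','t','c','h'] from rfl,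
      show "want".toList = ['w','a','n','t'] from rfl,
      show "love".toList = ['l','o','v','e'] from rfl,
      show "wanna".toList = ['w','a','n','n','a'] from rfl,
      show "gonna".toList = ['g','o','n','n','a'] from rfl,
      show "come".toList = ['c','o','m','e'] from rfl,
      show "right".toList = ['r','i','g','h','t'] from rfl,
      show "shit".toList = ['s','h','i','t'] from rfl,
      show "feel".toList = ['f','e','e','l'] from rfl,
      show "horus".toList = ['h','o','r','u','s'] from rfl,
      show "ome".toList = ['o','m','e'] from rfl,
      show "irl".toList = ['i','r','l'] from rfl,
      show "onna".toList = ['o','n','n','a'] from rfl,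
      show "oney".toList = ['o','n','e','y'] from rfl,
      show "aby".toList = ['a','b','y'] from rfl,
      show "itch".toList = ['i','t','c','h'] from rfl,
      show "igga".toList = ['i','g','g','a'] from rfl,
      show "ant".toList = ['a','n','t'] from rfl,
      show "anna".toList = ['a','n','n','a'] from rfl,
      show "ove".toList = ['o','v','e'] from rfl,
      show "ight".toList = ['i','g','h','t'] from rfl,
      show "hit".toList = ['h','i','t'] from rfl,
      show "eel".toList = ['e','e','l'] from rfl,
      List.isPrefixOf]
  · subst h4; simp [pvTargetWords,
      show "chorus".toList = ['c','h','o','r','u','s'] from rfl,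
      show "girl".toList = ['g','i','r','l'] from rfl,
      show "money".toList = ['m','o','n','e','y'] from rfl,
      show "baby".toList = ['b','a','b','y'] from rfl,
      show "nigga".toList = ['n','i','g','g','a'] from rfl,
      show "bitch".toList = ['b','i','t','c','h'] from rfl,
      show "want".toList = ['w','a','n','t'] from rfl,
      show "love".toList = ['l','o','v','e'] from rfl,
      show "wanna".toList = ['w','a','n','n','a'] from rfl,
      show "gonna".toList = ['g','o','n','n','a'] from rfl,
      show "come".toList = ['c','o','m','e'] from rfl,
      show "right".toList = ['r','i','g','h','t'] from rfl,
      show "shit".toList = ['s','h','i','t'] from rfl,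
      show "feel".toList = ['f','e','e','l'] from rfl,
      show "horus".toList = ['h','o','r','u','s'] from rfl,
      show "ome".toList = ['o','m','e'] from rfl,
      show "irl".toList = ['i','r','l'] from rfl,
      show "onna".toList = ['o','n','n','a'] from rfl,
      show "oney".toList = ['o','n','e','y'] from rfl,
      show "aby".toList = ['a','b','y'] from rfl,
      show "itch".toList = ['i','t','c','h'] from rfl,
      show "igga".toList = ['i','g','g','a'] from rfl,
      show "ant".toList = ['a','n','t'] from rfl,
      show "anna".toList = ['a','n','n','a'] from rfl,
      show "ove".toList = ['o','v','e'] from rfl,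
      show "ight".toList = ['i','g','h','t'] from rfl,
      show "hit".toList = ['h','i','t'] from rfl,
      show "eel".toList = ['e','e','l'] from rfl,
      List.isPrefixOf]
  · subst h5; simp [pvTargetWords,
      show "chorus".toList = ['c','h','o','r','u','s'] from rfl,
      show "girl".toList = ['g','i','r','l'] from rfl,
      show "money".toList = ['m','o','n','e','y'] from rfl,
      show "baby".toList = ['b','a','b','y'] from rfl,
      show "nigga".toList = ['n','i','g','g','a'] from rfl,
      show "bitch".toList = ['b','i','t','c','h'] from rfl,
      show "want".toList = ['w','a','n','t'] from rfl,
      show "love".toList = ['l','o','v','e'] from rfl,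
      show "wanna".toList = ['w','a','n','n','a'] from rfl,
      show "gonna".toList = ['g','o','n','n','a'] from rfl,
      show "come".toList = ['c','o','m','e'] from rfl,
      show "right".toList = ['r','i','g','h','t'] from rfl,
      show "shit".toList = ['s','h','i','t'] from rfl,
      show "feel".toList = ['f','e','e','l'] from rfl,
      show "horus".toList = ['h','o','r','u','s'] from rfl,
      show "ome".toList = ['o','m','e'] from rfl,
      show "irl".toList = ['i','r','l'] from rfl,
      show "onna".toList = ['o','n','n','a'] from rfl,
      show "oney".toList = ['o','n','e','y'] from rfl,
      show "aby".toList = ['a','b','y'] from rfl,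
      show "itch".toList = ['i','t','c','h'] from rfl,
      show "igga".toList = ['i','g','g','a'] from rfl,
      show "ant".toList = ['a','n','t'] from rfl,
      show "anna".toList = ['a','n','n','a'] from rfl,
      show "ove".toList = ['o','v','e'] from rfl,
      show "ight".toList = ['i','g','h','t'] from rfl,
      show "hit".toList = ['h','i','t'] from rfl,
      show "eel".toList = ['e','e','l'] from rfl,
      List.isPrefixOf]
  · subst h6; simp [pvTargetWords,
      show "chorus".toList = ['c','h','o','r','u','s'] from rfl,
      show "girl".toList = ['g','i','r','l'] from rfl,
      show "money".toList = ['m','o','n','e','y'] from rfl,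
      show "baby".toList = ['b','a','b','y'] from rfl,
      show "nigga".toList = ['n','i','g','g','a'] from rfl,
      show "bitch".toList = ['b','i','t','c','h'] from rfl,
      show "want".toList = ['w','a','n','t'] from rfl,
      show "love".toList = ['l','o','v','e'] from rfl,
      show "wanna".toList = ['w','a','n','n','a'] from rfl,
      show "gonna".toList = ['g','o','n','n','a'] from rfl,
      show "come".toList = ['c','o','m','e'] from rfl,
      show "right".toList = ['r','i','g','h','t'] from rfl,
      show "shit".toList = ['s','h','i','t'] from rfl,
      show "feel".toList = ['f','e','e','l'] from rfl,
      show "horus".toList = ['h','o','r','u','s'] from rfl,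
      show "ome".toList = ['o','m','e'] from rfl,
      show "irl".toList = ['i','r','l'] from rfl,
      show "onna".toList = ['o','n','n','a'] from rfl,
      show "oney".toList = ['o','n','e','y'] from rfl,
      show "aby".toList = ['a','b','y'] from rfl,
      show "itch".toList = ['i','t','c','h'] from rfl,
      show "igga".toList = ['i','g','g','a'] from rfl,
      show "ant".toList = ['a','n','t'] from rfl,
      show "anna".toList = ['a','n','n','a'] from rfl,
      show "ove".toList = ['o','v','e'] from rfl,
      show "ight".toList = ['i','g','h','t'] from rfl,
      show "hit".toList = ['h','i','t'] from rfl,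
      show "eel".toList = ['e','e','l'] from rfl,
      List.isPrefixOf]
  · subst h7; simp [pvTargetWords,
      show "chorus".toList = ['c','h','o','r','u','s'] from rfl,
      show "girl".toList = ['g','i','r','l'] from rfl,
      show "money".toList = ['m','o','n','e','y'] from rfl,
      show "baby".toList = ['b','a','b','y'] from rfl,
      show "nigga".toList = ['n','i','g','g','a'] from rfl,
      show "bitch".toList = ['b','i','t','c','h'] from rfl,
      show "want".toList = ['w','a','n','t'] from rfl,
      show "love".toList = ['l','o','v','e'] from rfl,
      show "wanna".toList = ['w','a','n','n','a'] from rfl,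
      show "gonna".toList = ['g','o','n','n','a'] from rfl,
      show "come".toList = ['c','o','m','e'] from rfl,
      show "right".toList = ['r','i','g','h','t'] from rfl,
      show "shit".toList = ['s','h','i','t'] from rfl,
      show "feel".toList = ['f','e','e','l'] from rfl,
      show "horus".toList = ['h','o','r','u','s'] from rfl,
      show "ome".toList = ['o','m','e'] from rfl,
      show "irl".toList = ['i','r','l'] from rfl,
      show "onna".toList = ['o','n','n','a'] from rfl,
      show "oney".toList = ['o','n','e','y'] from rfl,
      show "aby".toList = ['a','b','y'] from rfl,
      show "itch".toList = ['i','t','c','h'] from rfl,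
      show "igga".toList = ['i','g','g','a'] from rfl,
      show "ant".toList = ['a','n','t'] from rfl,
      show "anna".toList = ['a','n','n','a'] from rfl,
      show "ove".toList = ['o','v','e'] from rfl,
      show "ight".toList = ['i','g','h','t'] from rfl,
      show "hit".toList = ['h','i','t'] from rfl,
      show "eel".toList = ['e','e','l'] from rfl,
      List.isPrefixOf]
  · subst h8; simp [pvTargetWords,
      show "chorus".toList = ['c','h','o','r','u','s'] from rfl,
      show "girl".toList = ['g','i','r','l'] from rfl,
      show "money".toList = ['m','o','n','e','y'] from rfl,
      show "baby".toList = ['b','a','b','y'] from rfl,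
      show "nigga".toList = ['n','i','g','g','a'] from rfl,
      show "bitch".toList = ['b','i','t','c','h'] from rfl,
      show "want".toList = ['w','a','n','t'] from rfl,
      show "love".toList = ['l','o','v','e'] from rfl,
      show "wanna".toList = ['w','a','n','n','a'] from rfl,
      show "gonna".toList = ['g','o','n','n','a'] from rfl,
      show "come".toList = ['c','o','m','e'] from rfl,
      show "right".toList = ['r','i','g','h','t'] from rfl,
      show "shit".toList = ['s','h','i','t'] from rfl,
      show "feel".toList = ['f','e','e','l'] from rfl,
      show "horus".toList = ['h','o','r','u','s'] from rfl,
      show "ome".toList = ['o','m','e'] from rfl,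
      show "irl".toList = ['i','r','l'] from rfl,
      show "onna".toList = ['o','n','n','a'] from rfl,
      show "oney".toList = ['o','n','e','y'] from rfl,
      show "aby".toList = ['a','b','y'] from rfl,
      show "itch".toList = ['i','t','c','h'] from rfl,
      show "igga".toList = ['i','g','g','a'] from rfl,
      show "ant".toList = ['a','n','t'] from rfl,
      show "anna".toList = ['a','n','n','a'] from rfl,
      show "ove".toList = ['o','v','e'] from rfl,
      show "ight".toList = ['i','g','h','t'] from rfl,
      show "hit".toList = ['h','i','t'] from rfl,
      show "eel".toList = ['e','e','l'] from rfl,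
      List.isPrefixOf]
  · subst h9; simp [pvTargetWords,
      show "chorus".toList = ['c','h','o','r','u','s'] from rfl,
      show "girl".toList = ['g','i','r','l'] from rfl,
      show "money".toList = ['m','o','n','e','y'] from rfl,
      show "baby".toList = ['b','a','b','y'] from rfl,
      show "nigga".toList = ['n','i','g','g','a'] from rfl,
      show "bitch".toList = ['b','i','t','c','h'] from rfl,
      show "want".toList = ['w','a','n','t'] from rfl,
      show "love".toList = ['l','o','v','e'] from rfl,
      show "wanna".toList = ['w','a','n','n','a'] from rfl,
      show "gonna".toList = ['g','o','n','n','a'] from rfl,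
      show "come".toList = ['c','o','m','e'] from rfl,
      show "right".toList = ['r','i','g','h','t'] from rfl,
      show "shit".toList = ['s','h','i','t'] from rfl,
      show "feel".toList = ['f','e','e','l'] from rfl,
      show "horus".toList = ['h','o','r','u','s'] from rfl,
      show "ome".toList = ['o','m','e'] from rfl,
      show "irl".toList = ['i','r','l'] from rfl,
      show "onna".toList = ['o','n','n','a'] from rfl,
      show "oney".toList = ['o','n','e','y'] from rfl,
      show "aby".toList = ['a','b','y'] from rfl,
      show "itch".toList = ['i','t','c','h'] from rfl,
      show "igga".toList = ['i','g','g','a'] from rfl,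
      show "ant".toList = ['a','n','t'] from rfl,
      show "anna".toList = ['a','n','n','a'] from rfl,
      show "ove".toList = ['o','v','e'] from rfl,
      show "ight".toList = ['i','g','h','t'] from rfl,
      show "hit".toList = ['h','i','t'] from rfl,
      show "eel".toList = ['e','e','l'] from rfl,
      List.isPrefixOf]
  · subst h10; simp [pvTargetWords,
      show "chorus".toList = ['c','h','o','r','u','s'] from rfl,
      show "girl".toList = ['g','i','r','l'] from rfl,
      show "money".toList = ['m','o','n','e','y'] from rfl,
      show "baby".toList = ['b','a','b','y'] from rfl,
      show "nigga".toList = ['n','i','g','g','a'] from rfl,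
      show "bitch".toList = ['b','i','t','c','h'] from rfl,
      show "want".toList = ['w','a','n','t'] from rfl,
      show "love".toList = ['l','o','v','e'] from rfl,
      show "wanna".toList = ['w','a','n','n','a'] from rfl,
      show "gonna".toList = ['g','o','n','n','a'] from rfl,
      show "come".toList = ['c','o','m','e'] from rfl,
      show "right".toList = ['r','i','g','h','t'] from rfl,
      show "shit".toList = ['s','h','i','t'] from rfl,
      show "feel".toList = ['f','e','e','l'] from rfl,
      show "horus".toList = ['h','o','r','u','s'] from rfl,
      show "ome".toList = ['o','m','e'] from rfl,
      show "irl".toList = ['i','r','l'] from rfl,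
      show "onna".toList = ['o','n','n','a'] from rfl,
      show "oney".toList = ['o','n','e','y'] from rfl,
      show "aby".toList = ['a','b','y'] from rfl,
      show "itch".toList = ['i','t','c','h'] from rfl,
      show "igga".toList = ['i','g','g','a'] from rfl,
      show "ant".toList = ['a','n','t'] from rfl,
      show "anna".toList = ['a','n','n','a'] from rfl,
      show "ove".toList = ['o','v','e'] from rfl,
      show "ight".toList = ['i','g','h','t'] from rfl,
      show "hit".toList = ['h','i','t'] from rfl,
      show "eel".toList = ['e','e','l'] from rfl,
      List.isPrefixOf]
  ·
    have e1 : ('c' == c) = false := by simp [beq_iff_eq]; exact fun h => h1 h.symm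
    have e2 : ('g' == c) = false := by simp [beq_iff_eq]; exact fun h => h2 h.symm
    have e3 : ('m' == c) = false := by simp [beq_iff_eq]; exact fun h => h3 h.symm
    have e4 : ('b' == c) = false := by simp [beq_iff_eq]; exact fun h => h4 h.symm
    have e5 : ('n' == c) = false := by simp [beq_iff_eq]; exact fun h => h5 h.symm
    have e6 : ('w' == c) = false := by simp [beq_iff_eq]; exact fun h => h6 h.symm
    have e7 : ('l' == c) = false := by simp [beq_iff_eq]; exact fun h => h7 h.symm
    have e8 : ('r' == c) = false := by simp [beq_iff_eq]; exact fun h => h8 h.symm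
    have e9 : ('s' == c) = false := by simp [beq_iff_eq]; exact fun h => h9 h.symm
    have e10 : ('f' == c) = false := by simp [beq_iff_eq]; exact fun h => h10 h.symm
    simp [pvTargetWords,
      show "chorus".toList = ['c','h','o','r','u','s'] from rfl,
      show "girl".toList = ['g','i','r','l'] from rfl,
      show "money".toList = ['m','o','n','e','y'] from rfl,
      show "baby".toList = ['b','a','b','y'] from rfl,
      show "nigga".toList = ['n','i','g','g','a'] from rfl,
      show "bitch".toList = ['b','i','t','c','h'] from rfl,
      show "want".toList = ['w','a','n','t'] from rfl,
      show "love".toList = ['l','o','v','e'] from rfl,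
      show "wanna".toList = ['w','a','n','n','a'] from rfl,
      show "gonna".toList = ['g','o','n','n','a'] from rfl,
      show "come".toList = ['c','o','m','e'] from rfl,
      show "right".toList = ['r','i','g','h','t'] from rfl,
      show "shit".toList = ['s','h','i','t'] from rfl,
      show "feel".toList = ['f','e','e','l'] from rfl,
      show "horus".toList = ['h','o','r','u','s'] from rfl,
      show "ome".toList = ['o','m','e'] from rfl,
      show "irl".toList = ['i','r','l'] from rfl,
      show "onna".toList = ['o','n','n','a'] from rfl,
      show "oney".toList = ['o','n','e','y'] from rfl,
      show "aby".toList = ['a','b','y'] from rfl,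
      show "itch".toList = ['i','t','c','h'] from rfl,
      show "igga".toList = ['i','g','g','a'] from rfl,
      show "ant".toList = ['a','n','t'] from rfl,
      show "anna".toList = ['a','n','n','a'] from rfl,
      show "ove".toList = ['o','v','e'] from rfl,
      show "ight".toList = ['i','g','h','t'] from rfl,
      show "hit".toList = ['h','i','t'] from rfl,
      show "eel".toList = ['e','e','l'] from rfl,
      List.isPrefixOf, e1, e2, e3, e4, e5, e6, e7, e8, e9, e10]

-- merging the two any's of the cons step into one
theorem pv_any_or {α : Type} (l : List α) (f g : α → Bool) :
    (l.any fun x => f x || g x) = (l.any f || l.any g) := by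
  induction l with
  | nil => simp
  | cons a l ih => simp [ih, Bool.or_assoc, Bool.or_left_comm]

-- B's scan is "some target word is an infix".
theorem pv_scan_eq (xs : List Char) :
    pvScan xs = pvTargetWords.any (fun t => decide (t.toList <:+: xs)) := by
  induction xs with
  | nil => simp [pvScan, pvTargetWords]
  | cons c rest ih =>
    rw [pvScan, pv_byFirst_step, ih, ← pv_any_or]
    refine congrArg pvTargetWords.any (funext fun t => ?_)
    cases hp : t.toList.isPrefixOf (c :: rest) <;> cases hi : (decide (t.toList <:+: rest)) <;>
      simp_all [List.infix_cons_iff, ← List.isPrefixOf_iff_prefix]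

-- ===== VERDICT (by name: the statement is the Claim_ definition above) =====
theorem get_lda_words_spec : Claim_equal_get_lda_words := by
  intro review _
  unfold Spec_get_lda_words get_lda_words get_lda_words_alt
  rw [pv_scan_eq]
  simpa using pv_foldl_count_pos review pvTargetWords 0 le_rfl
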